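-- pv_equiv track=rewrite | github.com/dmet/engineering-drawing-extractor | table_parser.py | cluster_values
-- ===== SOURCE A (Python) =====
-- from typing import List, Tuple, Optional, Dict
--
-- def cluster_values(values: List[int], min_gap: int = 15) -> List[int]:
--     """Cluster nearby coordinate values; return the median of each cluster."""
--     if not values:
--         return []
--     sorted_vals = sorted(set(values))
--     clusters: List[List[int]] = [[sorted_vals[0]]]
--     for val in sorted_vals[1:]:
--         if val - clusters[-1][-1] <= min_gap:
--             clusters[-1].append(val)
--         else:
--             clusters.append([val])
--     return [c[len(c) // 2] for c in clusters]
-- ===== SOURCE B (Python) =====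
-- def cluster_values(values, min_gap=15):
--     """Cluster nearby coordinate values; return the median of each cluster.
--
--     Divide and conquer: split the sorted distinct values at the midpoint,
--     cluster each half recursively, and merge the two boundary clusters when
--     the gap across the midpoint is at most min_gap.
--     """
--     if not values:
--         return []
--
--     def clusters(seg):
--         if len(seg) <= 1:
--             return [seg]
--         m = len(seg) // 2
--         left = clusters(seg[:m])
--         right = clusters(seg[m:])
--         if right[0][0] - left[-1][-1] <= min_gap:
--             return left[:-1] + [left[-1] + right[0]] + right[1:]
--         return left + right
--
--     return [c[len(c) // 2] for c in clusters(sorted(set(values)))]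
-- ===== Notes on version B (the rewrite author's own statement) =====
-- stated objective: alternative
-- what changed: Replaces A's single left-to-right scan that grows a list of cluster lists with a positional divide-and-conquer: recursively cluster each half of the sorted distinct values and merge the two boundary clusters when the gap across the midpoint is at most min_gap.
import Mathlib
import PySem

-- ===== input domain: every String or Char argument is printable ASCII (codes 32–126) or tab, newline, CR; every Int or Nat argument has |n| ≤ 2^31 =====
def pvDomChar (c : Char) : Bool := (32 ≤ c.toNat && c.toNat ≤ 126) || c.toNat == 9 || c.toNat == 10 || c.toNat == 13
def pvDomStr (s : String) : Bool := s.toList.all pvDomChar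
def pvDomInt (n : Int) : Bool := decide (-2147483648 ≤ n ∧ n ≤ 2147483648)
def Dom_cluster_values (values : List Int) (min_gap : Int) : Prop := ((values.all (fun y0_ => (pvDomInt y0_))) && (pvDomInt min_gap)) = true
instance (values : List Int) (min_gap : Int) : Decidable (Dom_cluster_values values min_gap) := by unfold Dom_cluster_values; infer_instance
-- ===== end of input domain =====

-- B replaces A's left-to-right scan growing a list of cluster lists by a positional divide and
-- conquer: cluster each half of the sorted distinct values recursively and merge the two boundary
-- clusters when the gap across the midpoint is at most min_gap (objective: alternative).

-- ===== PORT A =====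
-- loop body of A: append val to the last cluster, or start a new cluster
def stepA (min_gap : Int) (cs : List (List Int)) (val : Int) : List (List Int) :=
  let last := (PySem.List.pyGet? cs (-1)).getD []
  if val - (PySem.List.pyGet? last (-1)).getD 0 ≤ min_gap then
    cs.dropLast ++ [last ++ [val]]
  else cs ++ [[val]]

def cluster_values (values : List Int) (min_gap : Int) : List Int :=
  if values = [] then []
  else
    ((PySem.List.slice (PySem.List.sorted (PySem.Set.ofList values) (fun x => x) false) (some 1) none).foldl
        (stepA min_gap)
        [[(PySem.List.pyGet? (PySem.List.sorted (PySem.Set.ofList values) (fun x => x) false) 0).getD 0]]).map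
      (fun c => PySem.List.pyGetD c (PySem.Int.floordiv (c.length : Int) 2) 0)

-- ===== PORT B =====
-- Python's inner 'clusters': split at the midpoint, recurse on the halves, merge boundary clusters
def clustersB (min_gap : Int) (seg : List Int) : List (List Int) :=
  if seg.length ≤ 1 then [seg]
  else
    let m : Int := PySem.Int.floordiv ((seg.length : Int)) 2
    let left := clustersB min_gap (PySem.List.slice seg none (some m))
    let right := clustersB min_gap (PySem.List.slice seg (some m) none)
    if (PySem.List.pyGet? ((PySem.List.pyGet? right 0).getD []) 0).getD 0
        - (PySem.List.pyGet? ((PySem.List.pyGet? left (-1)).getD []) (-1)).getD 0 ≤ min_gap then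
      PySem.List.slice left none (some (-1))
        ++ [((PySem.List.pyGet? left (-1)).getD []) ++ ((PySem.List.pyGet? right 0).getD [])]
        ++ PySem.List.slice right (some 1) none
    else left ++ right
termination_by seg.length
decreasing_by
  · have hm : PySem.Int.floordiv ((seg.length : Int)) 2 = ((seg.length / 2 : Nat) : Int) := by
      exact_mod_cast PySem.Int.floordiv_natCast seg.length 2
    simp only [hm, PySem.List.slice_to_natCast, List.length_take]
    omega
  · have hm : PySem.Int.floordiv ((seg.length : Int)) 2 = ((seg.length / 2 : Nat) : Int) := by
      exact_mod_cast PySem.Int.floordiv_natCast seg.length 2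
    simp only [hm, PySem.List.slice_from_natCast, List.length_drop]
    omega

def cluster_values_alt (values : List Int) (min_gap : Int) : List Int :=
  if values = [] then []
  else
    (clustersB min_gap (PySem.List.sorted (PySem.Set.ofList values) (fun x => x) false)).map
      (fun c => PySem.List.pyGetD c (PySem.Int.floordiv (c.length : Int) 2) 0)

-- ===== PRECONDITION & SPEC =====
def Spec_cluster_values (values : List Int) (min_gap : Int) (out : List Int) : Prop := out = cluster_values_alt values min_gap
instance (values : List Int) (min_gap : Int) (out : List Int) : Decidable (Spec_cluster_values values min_gap out) := by unfold Spec_cluster_values; infer_instance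

-- ===== CLAIM (what is proved, stated in full; the proofs are below) =====
def Claim_equal_cluster_values : Prop := ∀ (values : List Int) (min_gap : Int), Dom_cluster_values values min_gap → Spec_cluster_values values min_gap (cluster_values values min_gap)

-- ===== LEMMAS AND PROOFS =====

-- median of a cluster, as both ports compute it
def gmedian (c : List Int) : Int := PySem.List.pyGetD c (PySem.Int.floordiv (c.length : Int) 2) 0

-- reference chunking: split the remaining values into maximal runs of adjacent gap ≤ g, given the
-- current cluster `cur` whose last element is `lv`
def gchunks (g : Int) (cur : List Int) (lv : Int) : List Int → List (List Int)
  | [] => [cur]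
  | v :: vs => if v - lv ≤ g then gchunks g (cur ++ [v]) v vs
               else cur :: gchunks g [v] v vs

-- the clusters of a nonempty segment
def chunksOf (g : Int) : List Int → List (List Int)
  | [] => []
  | a :: t => gchunks g [a] a t

theorem foldA_eq_gchunks (g : Int) (rest : List Int) :
    ∀ (acc : List (List Int)) (cur : List Int) (lv : Int), cur.getLast? = some lv →
    rest.foldl (stepA g) (acc ++ [cur]) = acc ++ gchunks g cur lv rest := by
  induction rest with
  | nil => intro acc cur lv h; simp [gchunks]
  | cons v vs ih =>
    intro acc cur lv h
    have hstep : stepA g (acc ++ [cur]) v =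
        if v - lv ≤ g then acc ++ [cur ++ [v]] else (acc ++ [cur]) ++ [[v]] := by
      simp [stepA, PySem.List.pyGet?_neg_one, h]
    rw [List.foldl_cons, hstep, gchunks]
    by_cases hc : v - lv ≤ g
    · rw [if_pos hc, if_pos hc, ih acc (cur ++ [v]) v (by simp)]
    · rw [if_neg hc, if_neg hc, ih (acc ++ [cur]) [v] v (by simp), List.append_assoc]
      simp

theorem sorted_ne_nil (values : List Int) (h : values ≠ []) :
    PySem.List.sorted (PySem.Set.ofList values) (fun x => x) false ≠ [] := by
  obtain ⟨v, vs, rfl⟩ := List.exists_cons_of_ne_nil h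
  intro hnil
  have : v ∈ PySem.List.sorted (PySem.Set.ofList (v :: vs)) (fun x => x) false := by
    rw [PySem.List.mem_sorted, PySem.Set.mem_ofList]; simp
  rw [hnil] at this; exact absurd this (List.not_mem_nil)

-- the prefix `cur` only extends the FIRST chunk
theorem gchunks_prefix (g : Int) (rest : List Int) :
    ∀ (c d : List Int) (lv : Int),
    gchunks g (c ++ d) lv rest = (c ++ ((gchunks g d lv rest).headD [])) :: (gchunks g d lv rest).tail := by
  induction rest with
  | nil => intro c d lv; simp [gchunks]
  | cons v vs ih =>
    intro c d lv
    by_cases hc : v - lv ≤ g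
    · rw [gchunks, if_pos hc, show (c ++ d) ++ [v] = c ++ (d ++ [v]) from List.append_assoc c d [v],
        ih c (d ++ [v]) v, gchunks, if_pos hc]
    · rw [gchunks, if_neg hc, gchunks, if_neg hc]; simp

theorem gchunks_ne_nil (g : Int) (rest : List Int) :
    ∀ (cur : List Int) (lv : Int), gchunks g cur lv rest ≠ [] := by
  induction rest with
  | nil => intro cur lv; simp [gchunks]
  | cons v vs ih =>
    intro cur lv
    rw [gchunks]
    split_ifs with hc
    · exact ih (cur ++ [v]) v
    · simp

theorem gchunks_forall_ne_nil (g : Int) (rest : List Int) :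
    ∀ (cur : List Int) (lv : Int), cur ≠ [] → ∀ c ∈ gchunks g cur lv rest, c ≠ [] := by
  induction rest with
  | nil => intro cur lv hcur c hc; simp [gchunks] at hc; simpa [hc] using hcur
  | cons v vs ih =>
    intro cur lv hcur c hc
    rw [gchunks] at hc
    split_ifs at hc with h
    · exact ih (cur ++ [v]) v (by simp) c hc
    · rcases List.mem_cons.mp hc with rfl | hc'
      · exact hcur
      · exact ih [v] v (by simp) c hc'

theorem gchunks_flatten (g : Int) (rest : List Int) :
    ∀ (cur : List Int) (lv : Int), (gchunks g cur lv rest).flatten = cur ++ rest := by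
  induction rest with
  | nil => intro cur lv; simp [gchunks]
  | cons v vs ih =>
    intro cur lv
    rw [gchunks]
    split_ifs with hc
    · rw [ih (cur ++ [v]) v]; simp
    · simp [ih [v] v]

-- last element of the last chunk = last element of the flattening
theorem getLastD_getLast? (l : List (List Int)) (hall : ∀ c ∈ l, c ≠ []) :
    (l.getLastD []).getLast? = l.flatten.getLast? := by
  induction l with
  | nil => simp
  | cons x l' ih =>
    cases l' with
    | nil => simp
    | cons y t =>
      have hflat : (List.flatten (y :: t)) ≠ [] := by
        have hy : y ≠ [] := hall y (by simp)
        simp only [List.flatten_cons]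
        intro h
        exact hy (List.append_eq_nil_iff.mp h).1
      have h1 : ((x :: y :: t).getLastD ([] : List Int)) = ((y :: t).getLastD ([] : List Int)) := by
        simp
      rw [h1, ih (fun c hc => hall c (List.mem_cons_of_mem _ hc))]
      conv_rhs => rw [List.flatten_cons]
      exact (List.getLast?_append_of_ne_nil _ hflat).symm

-- break at the boundary: the two halves' chunkings concatenate
theorem gchunks_break (g : Int) (t : List Int) :
    ∀ (cur : List Int) (lv b : Int) (u : List Int), b - t.getLastD lv > g →
    gchunks g cur lv (t ++ b :: u) = gchunks g cur lv t ++ gchunks g [b] b u := by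
  induction t with
  | nil =>
    intro cur lv b u h
    simp only [List.getLastD_nil] at h
    rw [List.nil_append]
    simp only [gchunks]
    rw [if_neg (by omega)]
    rfl
  | cons w ws ih =>
    intro cur lv b u h
    rw [List.getLastD_cons] at h
    rw [List.cons_append, gchunks, gchunks]
    split_ifs with hc
    · exact ih (cur ++ [w]) w b u h
    · rw [ih [w] w b u h, List.cons_append]

-- merge at the boundary: the last left chunk and first right chunk join
theorem gchunks_merge (g : Int) (t : List Int) :
    ∀ (cur : List Int) (lv b : Int) (u : List Int), b - t.getLastD lv ≤ g →
    gchunks g cur lv (t ++ b :: u) =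
      (gchunks g cur lv t).dropLast
        ++ ((gchunks g cur lv t).getLastD [] ++ (gchunks g [b] b u).headD []) :: (gchunks g [b] b u).tail := by
  induction t with
  | nil =>
    intro cur lv b u h
    simp only [List.getLastD_nil] at h
    rw [List.nil_append]
    simp only [gchunks]
    rw [if_pos h, gchunks_prefix g u cur [b] b]
    simp
  | cons w ws ih =>
    intro cur lv b u h
    rw [List.getLastD_cons] at h
    rw [List.cons_append, gchunks, gchunks]
    split_ifs with hc
    · exact ih (cur ++ [w]) w b u h
    · rw [ih [w] w b u h]
      obtain ⟨x, xt, hx⟩ := List.exists_cons_of_ne_nil (gchunks_ne_nil g ws [w] w)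
      rw [hx]
      simp

-- B's boundary reads: first element of the first chunk, last element of the last chunk
theorem chunks_head_head (g b : Int) (u : List Int) :
    (PySem.List.pyGet? ((PySem.List.pyGet? (gchunks g [b] b u) 0).getD []) 0).getD 0 = b := by
  have h := gchunks_prefix g u [b] [] b
  simp only [List.append_nil] at h
  rw [h]
  simp

theorem chunks_last_last (g a : Int) (t : List Int) :
    (PySem.List.pyGet? ((PySem.List.pyGet? (gchunks g [a] a t) (-1)).getD []) (-1)).getD 0
      = t.getLastD a := by
  rw [PySem.List.pyGet?_neg_one, PySem.List.pyGet?_neg_one]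
  have h1 : ((gchunks g [a] a t).getLast?).getD [] = (gchunks g [a] a t).getLastD [] := by
    rw [List.getLastD_eq_getLast?]
  rw [h1, getLastD_getLast? _ (gchunks_forall_ne_nil g t [a] a (by simp)), gchunks_flatten]
  simp [List.getLast?_cons, List.getLastD_eq_getLast?]

theorem clustersB_eq_chunks (g : Int) (n : Nat) :
    ∀ (seg : List Int), seg.length ≤ n → seg ≠ [] → clustersB g seg = chunksOf g seg := by
  induction n with
  | zero =>
    intro seg hlen hne
    exact absurd (List.length_eq_zero_iff.mp (Nat.le_zero.mp hlen)) hne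
  | succ n ih =>
    intro seg hlen hne
    rw [clustersB]
    by_cases h1 : seg.length ≤ 1
    · obtain ⟨a, t, rfl⟩ := List.exists_cons_of_ne_nil hne
      have ht : t = [] := by simpa using h1
      subst ht
      rw [if_pos h1]
      simp [chunksOf, gchunks]
    · rw [if_neg h1]
      have hm : PySem.Int.floordiv ((seg.length : Int)) 2 = ((seg.length / 2 : Nat) : Int) := by
        exact_mod_cast PySem.Int.floordiv_natCast seg.length 2
      simp only [hm, PySem.List.slice_to_natCast, PySem.List.slice_from_natCast]
      set k := seg.length / 2 with hk
      have hk1 : 1 ≤ k := by omega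
      have hk2 : k < seg.length := by omega
      have hxs : seg.take k ≠ [] := List.ne_nil_of_length_pos (by rw [List.length_take]; omega)
      have hys : seg.drop k ≠ [] := List.ne_nil_of_length_pos (by rw [List.length_drop]; omega)
      rw [ih (seg.take k) (by rw [List.length_take]; omega) hxs,
        ih (seg.drop k) (by rw [List.length_drop]; omega) hys]
      obtain ⟨a, t, hxe⟩ := List.exists_cons_of_ne_nil hxs
      obtain ⟨b, u, hye⟩ := List.exists_cons_of_ne_nil hys
      have hseg : seg = (a :: t) ++ (b :: u) := by
        rw [← hxe, ← hye, List.take_append_drop]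
      rw [hxe, hye]
      simp only [chunksOf]
      rw [chunks_head_head g b u, chunks_last_last g a t]
      conv_rhs => rw [hseg]
      simp only [List.cons_append]
      rw [show t ++ (b :: u) = t ++ b :: u from rfl]
      by_cases hbd : b - t.getLastD a ≤ g
      · rw [if_pos hbd, gchunks_merge g t [a] a b u hbd]
        rw [PySem.List.slice_to_neg_one, PySem.List.slice_from_one,
          PySem.List.pyGet?_neg_one, PySem.List.pyGet?_zero]
        have hL : ((gchunks g [a] a t).getLast?).getD [] = (gchunks g [a] a t).getLastD [] := by
          rw [List.getLastD_eq_getLast?]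
        have hR : ((gchunks g [b] b u)[0]?).getD [] = (gchunks g [b] b u).headD [] := by
          cases hgc : gchunks g [b] b u with
          | nil => exact absurd hgc (gchunks_ne_nil g u [b] b)
          | cons x xt => simp
        rw [hL, hR]
        simp
      · rw [if_neg hbd, gchunks_break g t [a] a b u (by omega)]

-- ===== VERDICT (by name: the statement is the Claim_ definition above) =====
theorem cluster_values_spec : Claim_equal_cluster_values := by
  intro values min_gap _
  unfold Spec_cluster_values cluster_values cluster_values_alt
  by_cases hv : values = []
  · simp [hv]
  · rw [if_neg hv, if_neg hv]
    set sv := PySem.List.sorted (PySem.Set.ofList values) (fun x => x) false with hsv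
    have hne : sv ≠ [] := sorted_ne_nil values hv
    obtain ⟨v0, tl, he⟩ := List.exists_cons_of_ne_nil hne
    have hslice : PySem.List.slice sv (some 1) none = sv.drop 1 := by
      have := PySem.List.slice_from_natCast (xs := sv) (a := 1)
      simpa using this
    have hinit : (PySem.List.pyGet? sv 0).getD 0 = v0 := by
      rw [he, PySem.List.pyGet?_zero_cons]; rfl
    have hA := foldA_eq_gchunks min_gap (sv.drop 1) [] [v0] v0 (by simp)
    rw [hslice, hinit, show ([[v0]] : List (List Int)) = [] ++ [[v0]] from rfl, hA]
    rw [clustersB_eq_chunks min_gap sv.length sv (le_refl _) hne]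
    rw [he]
    simp only [chunksOf, List.drop_succ_cons, List.drop_zero, List.nil_append]
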